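-- pv_equiv track=rewrite | github.com/nlebovits/menard | src/menard/cli.py | _parse_skill_content
-- ===== SOURCE A (Python) =====
-- def _parse_skill_content(content: str, name: str) -> dict:
--     """Extract title and description from skill content."""
--     lines = content.strip().split("\n")
--     title = name
--     description = ""
--
--     for line in lines:
--         if line.startswith("# "):
--             title = line[2:].strip()
--         elif line.startswith("description:"):
--             description = line.split(":", 1)[1].strip()
--             break
--         elif not description and line.strip() and not line.startswith("#"):
--             description = line.strip()
--             break
--
--     return {
--         "title": title,
--         "description": description[:100] + "..." if len(description) > 100 else description,
--     }
-- ===== SOURCE B (Python) =====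
-- def _parse_skill_content(content: str, name: str) -> dict:
--     """Extract title and description from skill content (two separate passes)."""
--     lines = content.strip().split("\n")
--
--     def is_boundary(line):
--         return line.startswith("description:") or (
--             line.strip() and not line.startswith("#"))
--
--     idx = next((i for i, l in enumerate(lines) if is_boundary(l)), len(lines))
--
--     if idx < len(lines):
--         l = lines[idx]
--         if l.startswith("description:"):
--             description = l.split(":", 1)[1].strip()
--         else:
--             description = l.strip()
--     else:
--         description = ""
--
--     title = name
--     for l in reversed(lines[:idx]):
--         if l.startswith("# "):
--             title = l[2:].strip()
--             break
--
--     if len(description) > 100: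
--         description = description[:100] + "..."
--     return {"title": title, "description": description}
-- ===== Notes on version B (the rewrite author's own statement) =====
-- stated objective: alternative
-- what changed: A's single for-loop interleaves title accumulation with two break conditions; B makes two independent passes: a forward scan finds the first boundary line (description source), then a backward scan of the prefix before it finds the last '# ' title line.
import Mathlib
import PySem

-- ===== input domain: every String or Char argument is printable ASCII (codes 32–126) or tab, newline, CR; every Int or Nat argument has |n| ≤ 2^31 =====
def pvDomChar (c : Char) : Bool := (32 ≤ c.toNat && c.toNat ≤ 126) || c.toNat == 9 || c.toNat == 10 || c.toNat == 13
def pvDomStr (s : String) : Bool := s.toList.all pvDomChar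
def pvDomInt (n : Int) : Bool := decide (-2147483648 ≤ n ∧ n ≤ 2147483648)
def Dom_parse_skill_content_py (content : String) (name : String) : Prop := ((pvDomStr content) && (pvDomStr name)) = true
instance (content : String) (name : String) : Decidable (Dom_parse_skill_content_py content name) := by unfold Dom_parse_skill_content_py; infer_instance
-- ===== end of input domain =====

-- B replaces A's single intertwined break-loop by two independent passes (find the boundary line
-- for the description, then search the prefix backwards for the last '# ' title line); objective:
-- alternative decomposition, same cost.

-- ===== PORT A =====
-- A's for-loop with break, carrying (title, description) as state; the break arms return directly.
def pvA_loop : List String → String → String → String × String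
  | [], title, description => (title, description)
  | line :: rest, title, description =>
    if PySem.Str.startswith line "# " then
      pvA_loop rest (PySem.Str.strip (PySem.Str.slice line (some 2) none)) description
    else if PySem.Str.startswith line "description:" then
      -- line.split(":", 1)[1].strip(); the index is always in range because line contains ":"
      (title, PySem.Str.strip ((PySem.List.pyGet? ((PySem.Str.splitMax? line ":" 1).getD []) 1).getD ""))
    else if description == "" && PySem.Str.strip line != "" && !PySem.Str.startswith line "#" then
      (title, PySem.Str.strip line)
    else
      pvA_loop rest title description

def parse_skill_content_py (content : String) (name : String) : List (String × String) :=
  -- content.strip().split("\n"): the separator "\n" is non-empty, so split? is always `some`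
  let lines := (PySem.Str.split? (PySem.Str.strip content) "\n").getD []
  let r := pvA_loop lines name ""
  [("title", r.1),
   ("description",
     if PySem.Str.len r.2 > 100 then PySem.Str.slice r.2 none (some 100) ++ "..." else r.2)]

-- ===== PORT B =====
def pvB_isBoundary (line : String) : Bool :=
  PySem.Str.startswith line "description:" ||
    (PySem.Str.strip line != "" && !PySem.Str.startswith line "#")

def parse_skill_content_py_alt (content : String) (name : String) : List (String × String) :=
  let lines := (PySem.Str.split? (PySem.Str.strip content) "\n").getD []
  -- next((i for i, l in enumerate(lines) if is_boundary(l)), len(lines))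
  let idx := (lines.findIdx? pvB_isBoundary).getD lines.length
  let description :=
    if idx < lines.length then
      let l := (PySem.List.pyGet? lines (idx : Int)).getD ""  -- in range by the guard
      if PySem.Str.startswith l "description:" then
        PySem.Str.strip ((PySem.List.pyGet? ((PySem.Str.splitMax? l ":" 1).getD []) 1).getD "")
      else PySem.Str.strip l
    else ""
  -- backward scan of lines[:idx] for the last '# ' line
  let title :=
    match (lines.take idx).reverse.find? (fun l => PySem.Str.startswith l "# ") with
    | some l => PySem.Str.strip (PySem.Str.slice l (some 2) none)
    | none => name
  [("title", title),
   ("description",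
     if PySem.Str.len description > 100 then
       PySem.Str.slice description none (some 100) ++ "..."
     else description)]

-- ===== PRECONDITION & SPEC =====
def Spec_parse_skill_content_py (content : String) (name : String) (out : List (String × String)) : Prop := out = parse_skill_content_py_alt content name
instance (content : String) (name : String) (out : List (String × String)) : Decidable (Spec_parse_skill_content_py content name out) := by unfold Spec_parse_skill_content_py; infer_instance

-- ===== CLAIM (what is proved, stated in full; the proofs are below) =====
def Claim_equal_parse_skill_content_py : Prop := ∀ (content : String) (name : String), Dom_parse_skill_content_py content name → Spec_parse_skill_content_py content name (parse_skill_content_py content name)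

-- ===== LEMMAS AND PROOFS =====

-- proof-side names for the components of B's port
def pvB_idxOf (lines : List String) : Nat := (lines.findIdx? pvB_isBoundary).getD lines.length

def pvB_descOf (lines : List String) : String :=
  if pvB_idxOf lines < lines.length then
    let l := (PySem.List.pyGet? lines ((pvB_idxOf lines : Nat) : Int)).getD ""
    if PySem.Str.startswith l "description:" then
      PySem.Str.strip ((PySem.List.pyGet? ((PySem.Str.splitMax? l ":" 1).getD []) 1).getD "")
    else PySem.Str.strip l
  else ""

def pvB_titleOf (lines : List String) (t : String) : String :=
  match (lines.take (pvB_idxOf lines)).reverse.find? (fun l => PySem.Str.startswith l "# ") with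
  | some l => PySem.Str.strip (PySem.Str.slice l (some 2) none)
  | none => t

lemma pv_idx_cons_true {l : String} {rest : List String} (h : pvB_isBoundary l = true) :
    pvB_idxOf (l :: rest) = 0 := by
  simp [pvB_idxOf, List.findIdx?_cons, h]

lemma pv_idx_cons_false {l : String} {rest : List String} (h : pvB_isBoundary l = false) :
    pvB_idxOf (l :: rest) = pvB_idxOf rest + 1 := by
  simp only [pvB_idxOf, List.findIdx?_cons, h]
  cases List.findIdx? pvB_isBoundary rest <;> simp

lemma pv_desc_cons_true {l : String} {rest : List String} (h : pvB_isBoundary l = true) :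
    pvB_descOf (l :: rest) =
      (if PySem.Str.startswith l "description:" then
        PySem.Str.strip ((PySem.List.pyGet? ((PySem.Str.splitMax? l ":" 1).getD []) 1).getD "")
      else PySem.Str.strip l) := by
  simp [pvB_descOf, pv_idx_cons_true h]

lemma pv_desc_cons_false {l : String} {rest : List String} (h : pvB_isBoundary l = false) :
    pvB_descOf (l :: rest) = pvB_descOf rest := by
  simp only [pvB_descOf, pv_idx_cons_false h]
  have : ((((pvB_idxOf rest + 1 : Nat)) : Int)) = (((pvB_idxOf rest : Nat) : Int) + 1) := by push_cast; ring
  simp [PySem.List.pyGet?_natCast]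

lemma pv_title_cons_true {l : String} {rest : List String} (t : String)
    (h : pvB_isBoundary l = true) : pvB_titleOf (l :: rest) t = t := by
  simp [pvB_titleOf, pv_idx_cons_true h]

lemma pv_title_cons_false {l : String} {rest : List String} (t : String)
    (h : pvB_isBoundary l = false) :
    pvB_titleOf (l :: rest) t =
      (if PySem.Str.startswith l "# " then
        pvB_titleOf rest (PySem.Str.strip (PySem.Str.slice l (some 2) none))
      else pvB_titleOf rest t) := by
  rw [pvB_titleOf, pvB_titleOf, pvB_titleOf, pv_idx_cons_false h, List.take_succ_cons,
    List.reverse_cons, List.find?_append]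
  by_cases hs : PySem.Str.startswith l "# " = true
  · rw [if_pos hs,
      show List.find? (fun l => PySem.Str.startswith l "# ") [l] = some l from by
        simp only [List.find?_cons, List.find?_nil]; rw [hs]]
    cases (rest.take (pvB_idxOf rest)).reverse.find? (fun l => PySem.Str.startswith l "# ") <;> rfl
  · rw [if_neg hs,
      show List.find? (fun l => PySem.Str.startswith l "# ") [l] = none from by
        simp only [List.find?_cons, List.find?_nil]; rw [Bool.eq_false_iff.mpr hs]]
    cases (rest.take (pvB_idxOf rest)).reverse.find? (fun l => PySem.Str.startswith l "# ") <;> rfl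

-- a line starting with "# " starts with "#" and not with "description:"
lemma pv_hash_of_hashSpace {l : String} (h : PySem.Str.startswith l "# " = true) :
    PySem.Str.startswith l "#" = true := by
  simp only [PySem.Str.startswith_eq, PySem.Chars.startswith_iff] at h ⊢
  exact List.IsPrefix.trans (by decide) h

lemma pv_not_descr_of_hashSpace {l : String} (h : PySem.Str.startswith l "# " = true) :
    PySem.Str.startswith l "description:" = false := by
  simp only [PySem.Str.startswith_eq, PySem.Chars.startswith_iff] at h
  by_contra hc
  rw [Bool.not_eq_false, PySem.Str.startswith_eq, PySem.Chars.startswith_iff] at hc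
  rcases List.prefix_or_prefix_of_prefix h hc with h1 | h1 <;> revert h1 <;> decide

lemma pv_boundary_of_hashSpace {l : String} (h : PySem.Str.startswith l "# " = true) :
    pvB_isBoundary l = false := by
  rw [pvB_isBoundary, pv_not_descr_of_hashSpace h, pv_hash_of_hashSpace h]
  simp

-- the key invariant: A's loop started with description = "" computes B's two passes
lemma pv_loop_eq (lines : List String) : ∀ t : String,
    pvA_loop lines t "" = (pvB_titleOf lines t, pvB_descOf lines) := by
  induction lines with
  | nil => intro t; simp [pvA_loop, pvB_titleOf, pvB_descOf, pvB_idxOf]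
  | cons l rest ih =>
    intro t
    by_cases h1 : PySem.Str.startswith l "# " = true
    · have hb := pv_boundary_of_hashSpace h1
      rw [pvA_loop, if_pos h1, ih, pv_title_cons_false t hb, if_pos h1, pv_desc_cons_false hb]
    · by_cases hb : pvB_isBoundary l = true
      · rw [pvA_loop, if_neg h1, pv_title_cons_true t hb, pv_desc_cons_true hb]
        by_cases h2 : PySem.Str.startswith l "description:" = true
        · rw [if_pos h2, if_pos h2]
        · have h2f := Bool.eq_false_iff.mpr h2
          have hX : (PySem.Str.strip l != "" && !PySem.Str.startswith l "#") = true := by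
            rw [pvB_isBoundary, h2f, Bool.false_or] at hb; exact hb
          obtain ⟨ha, hn⟩ := Bool.and_eq_true_iff.mp hX
          have ha' : ¬ PySem.Str.strip l = "" := by simpa using ha
          have hn' : PySem.Chars.startswith l.toList ['#'] = false := by simpa using hn
          rw [if_neg h2, if_neg h2, if_pos (by simp [ha', hn'])]
      · have hbf := Bool.eq_false_iff.mpr hb
        obtain ⟨h2f, hXf⟩ := Bool.or_eq_false_iff.mp (by rwa [pvB_isBoundary] at hbf)
        have hXf' : ¬ PySem.Str.strip l = "" → PySem.Chars.startswith l.toList ['#'] = true := by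
          simpa using hXf
        rw [pvA_loop, if_neg h1, if_neg (by rw [h2f]; exact Bool.false_ne_true),
            if_neg (by simp; exact hXf'), ih,
            pv_title_cons_false t hbf, if_neg h1, pv_desc_cons_false hbf]

-- ===== VERDICT (by name: the statement is the Claim_ definition above) =====
set_option maxHeartbeats 1000000 in
theorem parse_skill_content_py_spec : Claim_equal_parse_skill_content_py := by
  intro content name _
  show parse_skill_content_py content name = parse_skill_content_py_alt content name
  rw [parse_skill_content_py, parse_skill_content_py_alt]
  simp only [pv_loop_eq ((PySem.Str.split? (PySem.Str.strip content) "\n").getD []) name,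
    pvB_titleOf, pvB_descOf, pvB_idxOf]
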